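-- pv_equiv track=rewrite | github.com/adamzwasserman/declaro | packages/declaro-tablix/src/declaro_tablix/domain/validators.py | validate_value_translations
-- ===== SOURCE A (Python) =====
-- from typing import Any, Dict, List, Set, Tuple
--
-- def validate_value_translations(translations: Dict[str, str]) -> Tuple[bool, List[str]]:
--     """Validate value translation mappings.
--
--     Args:
--         translations: Dictionary of value translations
--
--     Returns:
--         Tuple of (is_valid, list_of_errors)
--     """
--     errors = []
--
--     if not translations:
--         return True, []
--
--     # Check for empty keys
--     if any(not key or not str(key).strip() for key in translations.keys()):
--         errors.append("Translation keys cannot be empty")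
--
--     # Check for None values
--     if any(value is None for value in translations.values()):
--         errors.append("Translation values cannot be None")
--
--     # Check for non-string values
--     if any(not isinstance(value, str) for value in translations.values()):
--         errors.append("Translation values must be strings")
--
--     # Check for excessively long keys or values
--     for key, value in translations.items():
--         if len(str(key)) > 200:
--             errors.append(f"Translation key '{key}' is too long (max 200 characters)")
--         if len(str(value)) > 200:
--             errors.append(f"Translation value '{value}' is too long (max 200 characters)")
--
--     # Check for circular translations
--     if _has_circular_translations(translations):
--         errors.append("Circular translations detected")
--
--     return len(errors) == 0, errors
--
-- def _has_circular_translations(translations: Dict[str, str]) -> bool: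
--     """Check if translations contain circular references."""
--     # Build a graph of translations
--     graph = {}
--     for key, value in translations.items():
--         if value in translations:
--             graph[key] = value
--
--     # Check for cycles using DFS
--     visited = set()
--     rec_stack = set()
--
--     def has_cycle(node: str) -> bool:
--         if node in rec_stack:
--             return True
--         if node in visited:
--             return False
--
--         visited.add(node)
--         rec_stack.add(node)
--
--         if node in graph:
--             if has_cycle(graph[node]):
--                 return True
--
--         rec_stack.remove(node)
--         return False
--
--     for key in graph:
--         if key not in visited:
--             if has_cycle(key):
--                 return True
--
--     return False
-- ===== SOURCE B (Python) =====
-- def validate_value_translations(translations):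
--     """Validate value translation mappings (str -> str)."""
--     if not translations:
--         return True, []
--     errors = (
--         _empty_key_errors(translations)
--         + _length_errors(translations)
--         + _cycle_errors(translations)
--     )
--     return errors == [], errors
--
-- def _empty_key_errors(translations):
--     bad = [k for k in translations if not k.strip()]
--     return ["Translation keys cannot be empty"] if bad else []
--
-- def _length_errors(translations):
--     return [msg
--             for key, value in translations.items()
--             for msg in (
--                 ([f"Translation key '{key}' is too long (max 200 characters)"] if len(key) > 200 else [])
--                 + ([f"Translation value '{value}' is too long (max 200 characters)"] if len(value) > 200 else []))]
--
-- def _cycle_errors(translations):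
--     return ["Circular translations detected"] if _translation_chain_overruns(translations) else []
--
-- def _translation_chain_overruns(translations):
--     """Cycle test by bounded pointer-chasing: a chain longer than the number of
--     chained keys must revisit a key, hence be circular."""
--     step = {k: v for k, v in translations.items() if v in translations}
--     n = len(step)
--     return any(_chases_beyond(step, k, n + 1) for k in step)
--
-- def _chases_beyond(step, cur, hops):
--     while hops > 0 and cur in step:
--         cur = step[cur]
--         hops -= 1
--     return hops == 0
-- ===== Notes on version B (the rewrite author's own statement) =====
-- stated objective: alternative
-- what changed: The recursive DFS cycle detector with shared visited/rec_stack sets is replaced by bounded pointer-chasing (a translation chain longer than the number of chained keys must revisit a key, hence be circular), and the error list is assembled as a concatenation of three independently computed sections (empty-key / over-length via a comprehension / cycle) instead of A's sequential append-to-one-accumulator passes; the str-only None/non-string checks that can never fire are dropped.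
import Mathlib
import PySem

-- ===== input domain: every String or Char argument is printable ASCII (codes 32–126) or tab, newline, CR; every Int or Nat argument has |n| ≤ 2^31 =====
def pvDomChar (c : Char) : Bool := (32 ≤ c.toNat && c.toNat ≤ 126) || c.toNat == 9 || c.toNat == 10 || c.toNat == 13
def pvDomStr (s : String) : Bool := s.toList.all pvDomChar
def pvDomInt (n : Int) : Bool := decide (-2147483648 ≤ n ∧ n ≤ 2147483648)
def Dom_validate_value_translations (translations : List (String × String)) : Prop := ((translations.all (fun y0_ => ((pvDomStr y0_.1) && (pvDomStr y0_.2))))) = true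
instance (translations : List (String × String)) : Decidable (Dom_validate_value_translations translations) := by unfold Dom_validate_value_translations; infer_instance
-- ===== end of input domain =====

-- B replaces A's recursive DFS (shared visited/rec_stack sets) for cycle detection by bounded
-- pointer-chasing (a chain longer than the number of chained keys must be circular) and assembles
-- the error list as a concatenation of three independently computed sections instead of A's
-- sequential append-to-one-accumulator passes; objective: alternative (no speed claim).

-- ===== PORT A =====
-- Python A's recursive has_cycle(node) with the mutable sets `visited`/`rec_stack`.
-- The fuel argument (translations.length + 1) only makes the recursion structural: the
-- proof below (hcA_spec, zero case) shows it is never exhausted.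
def hcA (g : List (String × String)) : Nat → String → List String → List String → Bool × List String
  | 0, _, vis, _ => (true, vis)
  | fuel+1, node, vis, stk =>
    if stk.contains node then (true, vis)
    else if vis.contains node then (false, vis)
    else
      let vis' := PySem.Set.add vis node
      let stk' := PySem.Set.add stk node
      match g.lookup node with
      | some nxt => hcA g fuel nxt vis' stk'
      | none => (false, vis')

-- Python A's _has_circular_translations: build `graph`, then DFS from each unvisited key.
def hasCircA (translations : List (String × String)) : Bool :=
  let graph := translations.filter (fun p => (translations.map Prod.fst).contains p.2)
  (((graph.map Prod.fst).foldl (fun st key =>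
      if st.1 then st
      else if st.2.contains key then st
      else hcA graph (translations.length + 1) key st.2 []) (false, ([] : List String)))).1

def validate_value_translations (translations : List (String × String)) : Bool × List String :=
  if translations = [] then (true, [])
  else
    let errors : List String := []
    -- `not key or not str(key).strip()`
    let errors := if translations.any (fun p => p.1 == "" || PySem.Str.strip p.1 == "") then errors ++ ["Translation keys cannot be empty"] else errors
    -- the None-value and non-string-value `any` tests are constant false on str values: they append nothing
    let errors := translations.foldl (fun acc p =>
        let acc := if 200 < PySem.Str.len p.1 then acc ++ ["Translation key '" ++ p.1 ++ "' is too long (max 200 characters)"] else acc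
        if 200 < PySem.Str.len p.2 then acc ++ ["Translation value '" ++ p.2 ++ "' is too long (max 200 characters)"] else acc) errors
    let errors := if hasCircA translations then errors ++ ["Circular translations detected"] else errors
    (errors.length == 0, errors)

-- ===== PORT B =====
-- Python B's _chases_beyond: the while loop, one step per unit of `hops`.
def chasesB (g : List (String × String)) : Nat → String → Bool
  | 0, _ => true
  | h+1, cur =>
    match g.lookup cur with
    | some nxt => chasesB g h nxt
    | none => false

-- Python B's _translation_chain_overruns.
def hasCircB (translations : List (String × String)) : Bool :=
  let step := translations.filter (fun p => (translations.map Prod.fst).contains p.2)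
  let n := step.length
  (step.map Prod.fst).any (fun k => chasesB step (n+1) k)

-- Python B's _empty_key_errors.
def emptyKeyErrsB (translations : List (String × String)) : List String :=
  let bad := (translations.map Prod.fst).filter (fun k => PySem.Str.strip k == "")
  if bad.isEmpty then [] else ["Translation keys cannot be empty"]

-- Python B's _length_errors (the double comprehension).
def lengthErrsB (translations : List (String × String)) : List String :=
  translations.flatMap (fun p =>
    (if 200 < PySem.Str.len p.1 then ["Translation key '" ++ p.1 ++ "' is too long (max 200 characters)"] else []) ++
    (if 200 < PySem.Str.len p.2 then ["Translation value '" ++ p.2 ++ "' is too long (max 200 characters)"] else []))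

-- Python B's _cycle_errors.
def cycleErrsB (translations : List (String × String)) : List String :=
  if hasCircB translations then ["Circular translations detected"] else []

def validate_value_translations_alt (translations : List (String × String)) : Bool × List String :=
  if translations = [] then (true, [])
  else
    let errors := emptyKeyErrsB translations ++ lengthErrsB translations ++ cycleErrsB translations
    (errors == [], errors)

-- ===== PRECONDITION & SPEC =====
def Spec_validate_value_translations (translations : List (String × String)) (out : Bool × List String) : Prop := out = validate_value_translations_alt translations
instance (translations : List (String × String)) (out : Bool × List String) : Decidable (Spec_validate_value_translations translations out) := by unfold Spec_validate_value_translations; infer_instance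

-- ===== CLAIM (what is proved, stated in full; the proofs are below) =====
def Claim_equal_validate_value_translations : Prop := ∀ (translations : List (String × String)), Dom_validate_value_translations translations → Spec_validate_value_translations translations (validate_value_translations translations)

-- ===== LEMMAS AND PROOFS =====

-- The step map's semantics: iterate the (partial) successor function m times.
def iterS (g : List (String × String)) : Nat → String → Option String
  | 0, k => some k
  | m+1, k => (g.lookup k).bind (iterS g m)

-- a node whose successor chain never dies: exactly the nodes on or leading into a cycle
def AliveS (g : List (String × String)) (k : String) : Prop := ∀ m, (iterS g m k).isSome

theorem mem_of_lookup (l : List (String × String)) (a b : String)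
    (h : l.lookup a = some b) : (a, b) ∈ l := by
  induction l with
  | nil => simp [List.lookup] at h
  | cons p t ih =>
    obtain ⟨k, v⟩ := p
    by_cases hk : a = k
    · subst hk; simp [List.lookup] at h; simp [h]
    · simp only [List.lookup, beq_false_of_ne hk] at h
      exact List.mem_cons_of_mem _ (ih h)

theorem lookup_isSome_iff (l : List (String × String)) (v : String) :
    (l.lookup v).isSome = true ↔ v ∈ l.map Prod.fst := by
  induction l with
  | nil => simp [List.lookup]
  | cons p t ih =>
    obtain ⟨k, b⟩ := p
    by_cases h : v = k
    · subst h; simp [List.lookup]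
    · simp only [List.lookup, beq_false_of_ne h, List.map_cons, List.mem_cons]
      simp [h, ih]

theorem iterS_add (g : List (String × String)) (a b : Nat) (k : String) :
    iterS g (a + b) k = (iterS g a k).bind (iterS g b) := by
  induction a generalizing k with
  | zero => simp [iterS]
  | succ n ih =>
    have e : n + 1 + b = (n + b) + 1 := by omega
    rw [e, iterS, iterS]
    cases g.lookup k with
    | none => simp
    | some v => simp [ih v]

theorem iterS_prefix (g : List (String × String)) {a b : Nat} {k : String}
    (h : (iterS g a k).isSome) (hle : b ≤ a) : (iterS g b k).isSome := by
  have : a = b + (a - b) := by omega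
  rw [this, iterS_add] at h
  cases hb : iterS g b k with
  | none => rw [hb] at h; simp at h
  | some v => simp

theorem alive_of_cycle (g : List (String × String)) {m : Nat} {k : String}
    (h : iterS g m k = some k) (hm : 1 ≤ m) : AliveS g k := by
  intro t
  induction t using Nat.strong_induction_on with
  | _ t ih =>
    rcases Nat.lt_or_ge m t with hlt | hle
    · have : t = m + (t - m) := by omega
      rw [this, iterS_add, h]
      simpa using ih (t - m) (by omega)
    · exact iterS_prefix g (by simp [h]) hle

theorem alive_of_reach (g : List (String × String)) {a : Nat} {k v : String}
    (h : iterS g a k = some v) (hv : AliveS g v) : AliveS g k := by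
  intro t
  rcases Nat.lt_or_ge a t with hlt | hle
  · have : t = a + (t - a) := by omega
    rw [this, iterS_add, h]
    simpa using hv (t - a)
  · exact iterS_prefix g (by simp [h]) hle

theorem alive_step (g : List (String × String)) {k v : String} (h : g.lookup k = some v) :
    AliveS g k ↔ AliveS g v := by
  constructor
  · intro hk t
    have := hk (t + 1)
    rw [Nat.add_comm, iterS_add] at this
    simpa [iterS, h] using this
  · intro hv
    exact alive_of_reach g (a := 1) (by simp [iterS, h]) hv

theorem chasesB_eq_isSome (g : List (String × String)) (m : Nat) (k : String) :
    chasesB g m k = (iterS g m k).isSome := by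
  induction m generalizing k with
  | zero => simp [chasesB, iterS]
  | succ n ih =>
    rw [chasesB, iterS]
    cases g.lookup k with
    | none => simp
    | some v => simp [ih v]

theorem pigeon_aux (g : List (String × String)) {k : String}
    (h : (iterS g (g.length + 1) k).isSome) {i j : Nat}
    (hi : i < g.length + 1) (hj : j < g.length + 1) (hlt : i < j)
    (heq : (iterS g i k).getD "" = (iterS g j k).getD "") : AliveS g k := by
  have h0 : (iterS g i k).isSome := iterS_prefix g h (by omega)
  have h1 : (iterS g j k).isSome := iterS_prefix g h (by omega)
  cases hv : iterS g i k with
  | none => rw [hv] at h0; simp at h0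
  | some v =>
    cases hw : iterS g j k with
    | none => rw [hw] at h1; simp at h1
    | some w =>
      have hvw : v = w := by rw [hv, hw] at heq; simpa using heq
      subst hvw
      have hj' : iterS g (i + (j - i)) k = some v := by
        rw [Nat.add_sub_cancel' (by omega)]; exact hw
      rw [iterS_add, hv, Option.bind_some] at hj'
      have hcyc : AliveS g v := alive_of_cycle g hj' (by omega)
      exact alive_of_reach g hv hcyc

theorem pigeonhole_alive (g : List (String × String))
    {k : String} (h : (iterS g (g.length + 1) k).isSome) : AliveS g k := by
  set n := g.length with hn
  set ks := g.map Prod.fst with hks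
  -- the first n+1 chain nodes all lie in ks
  have hmem : ∀ i ≤ n, ∃ v, iterS g i k = some v ∧ v ∈ ks := by
    intro i hi
    have h1 : (iterS g (i+1) k).isSome := iterS_prefix g h (by omega)
    have h0 : (iterS g i k).isSome := iterS_prefix g h (by omega)
    cases hv : iterS g i k with
    | none => rw [hv] at h0; simp at h0
    | some v =>
      refine ⟨v, rfl, ?_⟩
      rw [iterS_add g i 1, hv] at h1
      simp only [Option.bind_some] at h1
      have hlv : (g.lookup v).isSome := by
        cases hl : g.lookup v with
        | none => simp [iterS, hl] at h1
        | some w => simp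
      rw [hks]
      exact (lookup_isSome_iff g v).mp hlv
  -- pigeonhole: two equal chain nodes among indices 0..n
  classical
  let c : Nat → String := fun i => (iterS g i k).getD ""
  have hmaps : Set.MapsTo c ↑(Finset.range (n+1)) ↑(ks.toFinset) := by
    intro i hi
    simp only [Finset.coe_range, Set.mem_Iio] at hi
    obtain ⟨v, hv, hvk⟩ := hmem i (by omega)
    simp only [c, hv, Option.getD_some, List.coe_toFinset, Set.mem_setOf_eq]
    exact hvk
  have hcard : ks.toFinset.card < (Finset.range (n+1)).card := by
    have h1 : ks.toFinset.card ≤ ks.length := ks.toFinset_card_le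
    have h2 : ks.length = n := by rw [hks, hn]; simp
    simp [Finset.card_range]; omega
  obtain ⟨i, hi, j, hj, hne, heq⟩ := Finset.exists_ne_map_eq_of_card_lt_of_maps_to hcard hmaps
  simp only [Finset.mem_range] at hi hj
  -- wlog i < j
  rcases Nat.lt_or_ge i j with hlt | hge
  case _ => exact pigeon_aux g h hi hj hlt heq
  case _ => exact pigeon_aux g h hj hi (by omega) heq.symm

theorem hcA_spec (g : List (String × String)) (tkeys : List String)
    (hg : ∀ p ∈ g, p.1 ∈ tkeys ∧ p.2 ∈ tkeys) :
    ∀ (fuel : Nat) (node : String) (vis stk : List String),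
    (∀ v ∈ vis, v ∉ stk → ¬ AliveS g v) →
    (∀ s ∈ stk, ∃ m, 1 ≤ m ∧ iterS g m s = some node) →
    stk ⊆ tkeys → stk.Nodup → node ∈ tkeys → tkeys.length + 1 ≤ fuel + stk.length →
    (((hcA g fuel node vis stk).1 = true ↔ AliveS g node) ∧
     ((hcA g fuel node vis stk).1 = false →
        (∀ v ∈ (hcA g fuel node vis stk).2, v ∉ stk → ¬ AliveS g v) ∧
        (∀ v ∈ vis, v ∈ (hcA g fuel node vis stk).2))) := by
  intro fuel
  induction fuel with
  | zero =>
    intro node vis stk _ _ Hsub Hnd _ Hfuel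
    exfalso
    have : stk.length ≤ tkeys.length := by
      calc stk.length = stk.toFinset.card := (List.toFinset_card_of_nodup Hnd).symm
        _ ≤ tkeys.toFinset.card :=
            Finset.card_le_card (fun x hx => List.mem_toFinset.mpr (Hsub (List.mem_toFinset.mp hx)))
        _ ≤ tkeys.length := tkeys.toFinset_card_le
    omega
  | succ f ih =>
    intro node vis stk Hvis Hstk Hsub Hnd Hnode Hfuel
    by_cases hstk : node ∈ stk
    · have hc : stk.contains node = true := List.contains_iff_mem.mpr hstk
      simp only [hcA, hc, if_true]
      obtain ⟨m, hm, hit⟩ := Hstk node hstk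
      exact ⟨by simp [alive_of_cycle g hit hm], by simp⟩
    · have hc : stk.contains node = false := by
        simpa [List.contains_iff_mem] using hstk
      by_cases hvis : node ∈ vis
      · have hcv : vis.contains node = true := List.contains_iff_mem.mpr hvis
        simp only [hcA, hc, hcv, if_true]
        have hna := Hvis node hvis hstk
        refine ⟨by simp [hna], fun _ => ⟨Hvis, fun v hv => hv⟩⟩
      · have hcv : vis.contains node = false := by simpa [List.contains_iff_mem] using hvis
        have hadd : PySem.Set.add vis node = vis ++ [node] := by
          simp [PySem.Set.add, PySem.Set.contains, hvis]
        have hadds : PySem.Set.add stk node = stk ++ [node] := by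
          simp [PySem.Set.add, PySem.Set.contains, hstk]
        cases hlk : g.lookup node with
        | none =>
          have hres0 : hcA g (f+1) node vis stk = (false, vis ++ [node]) := by
            simp [hcA, hlk, hstk, hvis]
          rw [hres0]
          have hna : ¬ AliveS g node := by
            intro ha
            have := ha 1
            simp [iterS, hlk] at this
          refine ⟨by simp [hna], fun _ => ⟨?_, fun v hv => List.mem_append.mpr (Or.inl hv)⟩⟩
          intro v hv hvs
          rcases List.mem_append.mp hv with h' | h'
          · exact Hvis v h' hvs
          · simp at h'; subst h'; exact hna
        | some nxt =>
          have hstep : ∀ s, iterS g 1 s = g.lookup s := by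
            intro s; simp [iterS]
          have hres : hcA g (f+1) node vis stk = hcA g f nxt (vis ++ [node]) (stk ++ [node]) := by
            simp [hcA, hlk, hstk, hvis]
          have Hvis' : ∀ v ∈ vis ++ [node], v ∉ stk ++ [node] → ¬ AliveS g v := by
            intro v hv hvs
            rcases List.mem_append.mp hv with h' | h'
            · exact Hvis v h' (fun hm => hvs (List.mem_append.mpr (Or.inl hm)))
            · simp at h'; subst h'; exact absurd (List.mem_append.mpr (Or.inr (by simp))) hvs
          have Hstk' : ∀ s ∈ stk ++ [node], ∃ m, 1 ≤ m ∧ iterS g m s = some nxt := by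
            intro s hs
            rcases List.mem_append.mp hs with h' | h'
            · obtain ⟨m, hm, hit⟩ := Hstk s h'
              exact ⟨m + 1, by omega, by rw [iterS_add, hit, Option.bind_some, hstep, hlk]⟩
            · simp at h'; subst h'
              exact ⟨1, le_refl 1, by rw [hstep, hlk]⟩
          have Hnxt : nxt ∈ tkeys := (hg (node, nxt) (mem_of_lookup g node nxt hlk)).2
          have Hsub' : stk ++ [node] ⊆ tkeys := by
            intro x hx
            rcases List.mem_append.mp hx with h' | h'
            · exact Hsub h'
            · simp at h'; subst h'; exact Hnode
          have Hnd' : (stk ++ [node]).Nodup := by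
            rw [List.nodup_append]
            refine ⟨Hnd, List.nodup_singleton _, ?_⟩
            intro a ha b hb
            have hbn : b = node := by simpa using hb
            subst hbn
            exact fun h => hstk (h ▸ ha)
          obtain ⟨hiff, hfalse⟩ := ih nxt (vis ++ [node]) (stk ++ [node]) Hvis' Hstk' Hsub' Hnd' Hnxt
            (by simp [List.length_append]; omega)
          rw [hres]
          constructor
          · rw [hiff, alive_step g hlk]
          · intro hf
            obtain ⟨hv', hsub'⟩ := hfalse hf
            have hnanode : ¬ AliveS g node := by
              rw [alive_step g hlk]
              intro ha
              rw [← hiff] at ha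
              rw [ha] at hf
              simp at hf
            refine ⟨?_, fun v hv => hsub' v (List.mem_append.mpr (Or.inl hv))⟩
            intro v hv hvs
            by_cases hvn : v = node
            · subst hvn; exact hnanode
            · exact hv' v hv (by
                intro hm
                rcases List.mem_append.mp hm with h' | h'
                · exact hvs h'
                · simp at h'; exact hvn h')


theorem outer_true (g : List (String × String)) (fuel : Nat) (l : List String) (vis : List String) :
    (l.foldl (fun st key =>
      if st.1 then st
      else if st.2.contains key then st
      else hcA g fuel key st.2 []) ((true, vis) : Bool × List String)) = (true, vis) := by
  induction l with
  | nil => rfl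
  | cons k t ih => simpa [List.foldl] using ih

theorem outer_spec (g : List (String × String)) (tkeys : List String)
    (hg : ∀ p ∈ g, p.1 ∈ tkeys ∧ p.2 ∈ tkeys) (fuel : Nat) (hfuel : tkeys.length + 1 ≤ fuel) :
    ∀ (l : List String) (vis : List String), (∀ k ∈ l, k ∈ tkeys) → (∀ v ∈ vis, ¬ AliveS g v) →
    ((l.foldl (fun st key =>
        if st.1 then st
        else if st.2.contains key then st
        else hcA g fuel key st.2 []) ((false, vis) : Bool × List String)).1 = true ↔
      ∃ k ∈ l, AliveS g k) := by
  intro l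
  induction l with
  | nil => intro vis _ _; simp
  | cons k t ih =>
    intro vis hk hvis
    by_cases hkv : k ∈ vis
    · have hc : vis.contains k = true := List.contains_iff_mem.mpr hkv
      have hna := hvis k hkv
      rw [List.foldl_cons]
      have hstep1 : (if ((false, vis) : Bool × List String).1 = true then ((false, vis) : Bool × List String)
          else if ((false, vis) : Bool × List String).2.contains k = true then (false, vis)
          else hcA g fuel k ((false, vis) : Bool × List String).2 []) = (false, vis) := by
        simp [hkv]
      rw [hstep1]
      rw [ih vis (fun x hx => hk x (List.mem_cons_of_mem _ hx)) hvis]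
      simp [hna]
    · have hc : vis.contains k = false := by simpa [List.contains_iff_mem] using hkv
      have hspec := hcA_spec g tkeys hg fuel k vis []
        (fun v hv _ => hvis v hv) (by simp) (by simp) List.nodup_nil
        (hk k (List.mem_cons_self))
        (by simpa using hfuel)
      obtain ⟨hiff, hfalse⟩ := hspec
      rw [List.foldl_cons]
      have hstep2 : (if ((false, vis) : Bool × List String).1 = true then ((false, vis) : Bool × List String)
          else if ((false, vis) : Bool × List String).2.contains k = true then (false, vis)
          else hcA g fuel k ((false, vis) : Bool × List String).2 []) = hcA g fuel k vis [] := by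
        simp [hkv]
      rw [hstep2]
      cases hr : (hcA g fuel k vis []).1 with
      | true =>
        have hrr : hcA g fuel k vis [] = (true, (hcA g fuel k vis []).2) := by
          rw [← hr]
        rw [hrr, outer_true]
        simp only [true_iff]
        exact ⟨k, List.mem_cons_self, hiff.mp hr⟩
      | false =>
        obtain ⟨hv2, _⟩ := hfalse hr
        have hrr : hcA g fuel k vis [] = (false, (hcA g fuel k vis []).2) := by
          rw [← hr]
        rw [hrr]
        rw [ih _ (fun x hx => hk x (List.mem_cons_of_mem _ hx)) (fun v hv => hv2 v hv (by simp))]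
        have hna : ¬ AliveS g k := fun ha => by
          rw [hiff.mpr ha] at hr; simp at hr
        simp [hna]

theorem hasCircA_iff (t : List (String × String)) :
    (hasCircA t = true) ↔
      ∃ k ∈ (t.filter (fun p => (t.map Prod.fst).contains p.2)).map Prod.fst,
        AliveS (t.filter (fun p => (t.map Prod.fst).contains p.2)) k := by
  unfold hasCircA
  set g := t.filter (fun p => (t.map Prod.fst).contains p.2) with hgdef
  have hg : ∀ p ∈ g, p.1 ∈ t.map Prod.fst ∧ p.2 ∈ t.map Prod.fst := by
    intro p hp
    rw [hgdef, List.mem_filter] at hp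
    exact ⟨List.mem_map_of_mem hp.1, List.contains_iff_mem.mp hp.2⟩
  have hk : ∀ k ∈ g.map Prod.fst, k ∈ t.map Prod.fst := by
    intro k hkk
    obtain ⟨p, hp, rfl⟩ := List.mem_map.mp hkk
    exact (hg p hp).1
  exact outer_spec g (t.map Prod.fst) hg (t.length + 1) (by simp) (g.map Prod.fst) [] hk
    (by simp)

theorem hasCircB_iff (t : List (String × String)) :
    (hasCircB t = true) ↔
      ∃ k ∈ (t.filter (fun p => (t.map Prod.fst).contains p.2)).map Prod.fst,
        AliveS (t.filter (fun p => (t.map Prod.fst).contains p.2)) k := by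
  unfold hasCircB
  set g := t.filter (fun p => (t.map Prod.fst).contains p.2) with hgdef
  rw [List.any_eq_true]
  constructor
  · rintro ⟨k, hk, hs⟩
    refine ⟨k, hk, ?_⟩
    rw [chasesB_eq_isSome] at hs
    exact pigeonhole_alive g hs
  · rintro ⟨k, hk, ha⟩
    exact ⟨k, hk, by rw [chasesB_eq_isSome]; exact ha (g.length + 1)⟩

theorem hasCirc_eq (t : List (String × String)) : hasCircA t = hasCircB t := by
  rw [Bool.eq_iff_iff, hasCircA_iff t, hasCircB_iff t]

-- A's empty-key `any` over the pairs equals B's nonemptiness of the filtered key list.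
theorem empty_key_eq (t : List (String × String)) :
    (t.any fun p => p.1 == "" || PySem.Str.strip p.1 == "") =
    !((t.map Prod.fst).filter (fun k => PySem.Str.strip k == "")).isEmpty := by
  have h1 : (t.any fun p => p.1 == "" || PySem.Str.strip p.1 == "") =
      (t.any fun p => PySem.Str.strip p.1 == "") := by
    apply PySem.List.any_congr_mem
    intro p _
    by_cases h : p.1 = ""
    · rw [h]; decide
    · simp [beq_false_of_ne h]
  rw [h1, Bool.eq_iff_iff]
  simp [List.any_eq_true, List.isEmpty_eq_false_iff, List.filter_eq_nil_iff]

-- A's over-length foldl pass from any initial list equals appending B's comprehension.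
theorem long_loop_eq (t : List (String × String)) (init : List String) :
    (t.foldl (fun acc p =>
        let acc := if 200 < PySem.Str.len p.1 then acc ++ ["Translation key '" ++ p.1 ++ "' is too long (max 200 characters)"] else acc
        if 200 < PySem.Str.len p.2 then acc ++ ["Translation value '" ++ p.2 ++ "' is too long (max 200 characters)"] else acc) init) =
    init ++ lengthErrsB t := by
  unfold lengthErrsB
  rw [← PySem.List.foldl_append_eq_flatMap]
  apply PySem.List.foldl_congr_mem
  intro acc p _
  split_ifs <;> simp

theorem beq_nil_eq_len (l : List String) : (l == []) = (l.length == 0) := by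
  cases l <;> rfl

-- ===== VERDICT (by name: the statement is the Claim_ definition above) =====
theorem validate_value_translations_spec : Claim_equal_validate_value_translations := by
  intro t _
  unfold Spec_validate_value_translations
  unfold validate_value_translations validate_value_translations_alt emptyKeyErrsB cycleErrsB
  by_cases ht : t = []
  · simp [ht]
  · simp only [if_neg ht]
    rw [empty_key_eq, long_loop_eq, hasCirc_eq, beq_nil_eq_len]
    cases hbad : ((t.map Prod.fst).filter (fun k => PySem.Str.strip k == "")).isEmpty <;>
      cases hc : hasCircB t <;> simp
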